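-- pv_equiv track=rewrite | github.com/LEO2822/rfp-ofsaa | excelbot_backend.py | analyze_source_type
-- ===== SOURCE A (Python) =====
-- def analyze_source_type(url: str) -> str:
--     """Categorize source types for better analysis"""
--     url_lower = url.lower()
--     if 'oracle.com' in url_lower:
--         if 'docs.oracle.com' in url_lower:
--             return "Official Oracle Documentation"
--         elif 'support.oracle.com' in url_lower:
--             return "Oracle Support Resources"
--         elif 'blogs.oracle.com' in url_lower:
--             return "Oracle Technical Blogs"
--         else:
--             return "Oracle Official Website"
--     elif any(domain in url_lower for domain in ['github.com', 'stackoverflow.com']):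
--         return "Developer Community Resources"
--     elif any(domain in url_lower for domain in ['.edu', 'research', 'academic']):
--         return "Academic/Research Resources"
--     elif any(domain in url_lower for domain in ['techcrunch', 'zdnet', 'computerweekly', 'itworld', 'finextra']):
--         return "Technology News/Analysis"
--     elif 'banking' in url_lower or 'financial' in url_lower:
--         return "Banking/Financial Industry Resources"
--     else:
--         return "Industry/Technical Articles"
-- ===== SOURCE B (Python) =====
-- _RULES = [
--     (['docs.oracle.com'], "Official Oracle Documentation"),
--     (['support.oracle.com'], "Oracle Support Resources"),
--     (['blogs.oracle.com'], "Oracle Technical Blogs"),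
--     (['oracle.com'], "Oracle Official Website"),
--     (['github.com', 'stackoverflow.com'], "Developer Community Resources"),
--     (['.edu', 'research', 'academic'], "Academic/Research Resources"),
--     (['techcrunch', 'zdnet', 'computerweekly', 'itworld', 'finextra'], "Technology News/Analysis"),
--     (['banking', 'financial'], "Banking/Financial Industry Resources"),
-- ]
--
-- def analyze_source_type(url: str) -> str:
--     """Categorize source types for better analysis"""
--     url_lower = url.lower()
--     for patterns, label in _RULES:
--         if any(p in url_lower for p in patterns):
--             return label
--     return "Industry/Technical Articles"
-- ===== Notes on version B (the rewrite author's own statement) =====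
-- stated objective: idiomatic
-- what changed: Replaced the nested if/elif cascade with a data-driven ordered rule table (patterns, label) scanned by a single loop returning the first match, with the oracle subdomain rules placed before the catch-all oracle.com rule to preserve A's priority.
import Mathlib
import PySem

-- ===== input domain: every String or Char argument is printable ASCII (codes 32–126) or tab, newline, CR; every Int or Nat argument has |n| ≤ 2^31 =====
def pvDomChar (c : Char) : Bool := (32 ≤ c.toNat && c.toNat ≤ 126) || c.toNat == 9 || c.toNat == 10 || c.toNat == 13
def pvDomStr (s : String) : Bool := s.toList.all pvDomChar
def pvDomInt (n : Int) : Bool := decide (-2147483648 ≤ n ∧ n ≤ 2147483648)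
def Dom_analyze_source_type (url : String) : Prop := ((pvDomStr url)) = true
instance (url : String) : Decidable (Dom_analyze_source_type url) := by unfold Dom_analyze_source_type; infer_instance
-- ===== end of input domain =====

-- B replaces A's nested if/elif cascade by a data-driven ordered rule table scanned by one
-- loop returning the first matching label (objective: idiomatic); same return value everywhere.

-- ===== PORT A =====
def analyze_source_type (url : String) : String :=
  let url_lower := PySem.Str.lower url
  if PySem.Str.isIn "oracle.com" url_lower then
    if PySem.Str.isIn "docs.oracle.com" url_lower then "Official Oracle Documentation"
    else if PySem.Str.isIn "support.oracle.com" url_lower then "Oracle Support Resources"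
    else if PySem.Str.isIn "blogs.oracle.com" url_lower then "Oracle Technical Blogs"
    else "Oracle Official Website"
  else if ["github.com", "stackoverflow.com"].any (fun d => PySem.Str.isIn d url_lower) then
    "Developer Community Resources"
  else if [".edu", "research", "academic"].any (fun d => PySem.Str.isIn d url_lower) then
    "Academic/Research Resources"
  else if ["techcrunch", "zdnet", "computerweekly", "itworld", "finextra"].any
      (fun d => PySem.Str.isIn d url_lower) then
    "Technology News/Analysis"
  else if PySem.Str.isIn "banking" url_lower || PySem.Str.isIn "financial" url_lower then
    "Banking/Financial Industry Resources"
  else "Industry/Technical Articles"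

-- ===== PORT B =====
def pvRules : List (List String × String) :=
  [ (["docs.oracle.com"], "Official Oracle Documentation"),
    (["support.oracle.com"], "Oracle Support Resources"),
    (["blogs.oracle.com"], "Oracle Technical Blogs"),
    (["oracle.com"], "Oracle Official Website"),
    (["github.com", "stackoverflow.com"], "Developer Community Resources"),
    ([".edu", "research", "academic"], "Academic/Research Resources"),
    (["techcrunch", "zdnet", "computerweekly", "itworld", "finextra"], "Technology News/Analysis"),
    (["banking", "financial"], "Banking/Financial Industry Resources") ]

def pvFirstMatch (s : String) : List (List String × String) → String
  | [] => "Industry/Technical Articles"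
  | (ps, label) :: rest =>
      if ps.any (fun p => PySem.Str.isIn p s) then label else pvFirstMatch s rest

def analyze_source_type_alt (url : String) : String :=
  pvFirstMatch (PySem.Str.lower url) pvRules

-- ===== PRECONDITION & SPEC =====
def Spec_analyze_source_type (url : String) (out : String) : Prop := out = analyze_source_type_alt url
instance (url : String) (out : String) : Decidable (Spec_analyze_source_type url out) := by unfold Spec_analyze_source_type; infer_instance

-- ===== CLAIM (what is proved, stated in full; the proofs are below) =====
def Claim_equal_analyze_source_type : Prop := ∀ (url : String), Dom_analyze_source_type url → Spec_analyze_source_type url (analyze_source_type url)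

-- ===== LEMMAS AND PROOFS =====

-- substring containment is transitive through an infix pattern
theorem pv_isIn_of_infix {a b s : List Char} (h : a <:+: b)
    (hb : PySem.Chars.isIn b s = true) : PySem.Chars.isIn a s = true := by
  rw [PySem.Chars.isIn_iff_infix] at hb ⊢
  exact h.trans hb

-- ===== VERDICT (by name: the statement is the Claim_ definition above) =====
theorem analyze_source_type_spec : Claim_equal_analyze_source_type := by
  intro url _
  unfold Spec_analyze_source_type analyze_source_type analyze_source_type_alt pvRules
  set s := PySem.Str.lower url with hs
  simp only [pvFirstMatch, List.any_cons, List.any_nil, Bool.or_false, PySem.Str.isIn_eq]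
  by_cases hdocs : PySem.Chars.isIn ['d', 'o', 'c', 's', '.', 'o', 'r', 'a', 'c', 'l', 'e', '.', 'c', 'o', 'm'] s.toList = true
  · simp [hdocs, pv_isIn_of_infix (a := ['o', 'r', 'a', 'c', 'l', 'e', '.', 'c', 'o', 'm']) (b := ['d', 'o', 'c', 's', '.', 'o', 'r', 'a', 'c', 'l', 'e', '.', 'c', 'o', 'm']) (by decide) hdocs]
  · by_cases hsup : PySem.Chars.isIn ['s', 'u', 'p', 'p', 'o', 'r', 't', '.', 'o', 'r', 'a', 'c', 'l', 'e', '.', 'c', 'o', 'm'] s.toList = true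
    · simp [hdocs, hsup, pv_isIn_of_infix (a := ['o', 'r', 'a', 'c', 'l', 'e', '.', 'c', 'o', 'm']) (b := ['s', 'u', 'p', 'p', 'o', 'r', 't', '.', 'o', 'r', 'a', 'c', 'l', 'e', '.', 'c', 'o', 'm']) (by decide) hsup]
    · by_cases hblog : PySem.Chars.isIn ['b', 'l', 'o', 'g', 's', '.', 'o', 'r', 'a', 'c', 'l', 'e', '.', 'c', 'o', 'm'] s.toList = true
      · simp [hdocs, hsup, hblog, pv_isIn_of_infix (a := ['o', 'r', 'a', 'c', 'l', 'e', '.', 'c', 'o', 'm']) (b := ['b', 'l', 'o', 'g', 's', '.', 'o', 'r', 'a', 'c', 'l', 'e', '.', 'c', 'o', 'm']) (by decide) hblog]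
      · by_cases hor : PySem.Chars.isIn ['o', 'r', 'a', 'c', 'l', 'e', '.', 'c', 'o', 'm'] s.toList = true
        · simp [hdocs, hsup, hblog, hor]
        · simp [hdocs, hsup, hblog, hor]
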